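-- pv_equiv track=rewrite | github.com/wolandvp-beep/ai-math-1-4 | explanation_engine.py | explain_simple_division
-- ===== SOURCE A (Python) =====
-- def normalize_sentence(text: str) -> str:
--     line = str(text or '').strip()
--     if not line:
--         return ''
--     line = line.rstrip()
--     if line[-1] not in '.!?':
--         line += '.'
--     return line
--
-- def join_explanation_lines(*lines: str) -> str:
--     parts = [normalize_sentence(line) for line in lines if str(line or '').strip()]
--     return '\n'.join(parts)
--
-- def _build_long_division_steps_v9(dividend: int, divisor: int):
--     digits = list(str(dividend))
--     steps = []
--     current = ''
--     quotient = ''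
--     started = False
--     for index, digit in enumerate(digits):
--         current += digit
--         current_number = int(current)
--         if current_number < divisor:
--             if started:
--                 quotient += '0'
--             continue
--         started = True
--         q_digit = current_number // divisor
--         product = q_digit * divisor
--         remainder = current_number - product
--         steps.append({'current': current_number, 'q_digit': q_digit, 'product': product, 'remainder': remainder, 'next_digit': int(digits[index + 1]) if index + 1 < len(digits) else None})
--         quotient += str(q_digit)
--         current = str(remainder)
--     if not started:
--         quotient = '0'
--     remainder = int(current or '0')
--     return {'steps': steps, 'quotient': quotient, 'remainder': remainder}
--
-- def explain_simple_division(left: int, right: int) -> str: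
--     if right == 0:
--         return join_explanation_lines('На ноль делить нельзя', 'Ответ: деление на ноль невозможно', 'Совет: сначала смотри на делитель')
--     quotient, remainder = divmod(left, right)
--     if left < 100 and right < 10:
--         if remainder == 0:
--             return join_explanation_lines('Ищем, сколько раз делитель помещается в делимом', f'{quotient} × {right} = {left}, значит {left} : {right} = {quotient}', f'Ответ: {quotient}', 'Совет: в делении ищи число, которое при умножении даёт делимое')
--         return join_explanation_lines('Ищем, сколько полных раз делитель помещается в делимом', f'{quotient} × {right} = {quotient * right}', f'После вычитания остаётся {left - quotient * right}', f'Ответ: {quotient}, остаток {remainder}', 'Совет: остаток всегда должен быть меньше делителя')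
--     model = _build_long_division_steps_v9(left, right)
--     steps = model['steps']
--     lines = ['Ищем частное']
--     if not steps:
--         lines.append(f'{left} меньше {right}, значит в частном будет 0')
--         if remainder:
--             lines.append(f'Остаток равен {remainder}')
--         answer_text = '0' if remainder == 0 else f'0, остаток {remainder}'
--         return join_explanation_lines(*lines, f'Ответ: {answer_text}', 'Совет: если делимое меньше делителя, частное начинается с нуля')
--     first_step = steps[0]
--     lines.append(f"Сначала берём первое неполное делимое {first_step['current']}")
--     for index, step in enumerate(steps):
--         current = step['current']
--         q_digit = step['q_digit']
--         product = step['product']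
--         remainder_value = step['remainder']
--         next_current = steps[index + 1]['current'] if index + 1 < len(steps) else None
--         next_try = (q_digit + 1) * right
--         if next_try > current:
--             choice_part = f'Подбираем {q_digit}, потому что {q_digit} × {right} = {product}, а {q_digit + 1} × {right} = {next_try}, это уже больше'
--         else:
--             choice_part = f'Подбираем {q_digit}, потому что {q_digit} × {right} = {product}'
--         if next_current is not None:
--             lines.append(f'{choice_part}. После вычитания остаётся {remainder_value}, сносим следующую цифру и получаем {next_current}')
--         elif remainder_value == 0:
--             lines.append(f'{choice_part}. После вычитания остаётся 0, деление закончено')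
--         else:
--             lines.append(f'{choice_part}. После вычитания остаётся {remainder_value}, это и есть остаток')
--     answer_text = str(quotient) if remainder == 0 else f'{quotient}, остаток {remainder}'
--     advice = 'в делении столбиком повторяй шаги: взял, подобрал, умножил, вычел'
--     return join_explanation_lines(*lines, f'Ответ: {answer_text}', f'Совет: {advice}')
-- ===== SOURCE B (Python) =====
-- def normalize_sentence(text: str) -> str:
--     line = str(text or '').strip()
--     if not line:
--         return ''
--     line = line.rstrip()
--     if line[-1] not in '.!?':
--         line += '.'
--     return line
--
-- def join_explanation_lines(*lines: str) -> str:
--     parts = [normalize_sentence(line) for line in lines if str(line or '').strip()]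
--     return '\n'.join(parts)
--
-- def _mul_eq(a, b):
--     return f'{a} × {b} = {a * b}'
--
-- def _choice(right, c):
--     # everything about a division step is recomputed from its value c alone
--     q = c // right
--     text = f'Подбираем {q}, потому что ' + _mul_eq(q, right)
--     if (q + 1) * right > c:
--         text += ', а ' + _mul_eq(q + 1, right) + ', это уже больше'
--     return text + f'. После вычитания остаётся {c - q * right}'
--
-- def explain_simple_division(left: int, right: int) -> str:
--     if right == 0:
--         return join_explanation_lines('На ноль делить нельзя', 'Ответ: деление на ноль невозможно', 'Совет: сначала смотри на делитель')
--     quotient, remainder = divmod(left, right)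
--     if left < 100 and right < 10:
--         if remainder == 0:
--             rows = ['Ищем, сколько раз делитель помещается в делимом',
--                     _mul_eq(quotient, right) + f', значит {left} : {right} = {quotient}',
--                     f'Ответ: {quotient}',
--                     'Совет: в делении ищи число, которое при умножении даёт делимое']
--         else:
--             rows = ['Ищем, сколько полных раз делитель помещается в делимом',
--                     _mul_eq(quotient, right),
--                     f'После вычитания остаётся {left - quotient * right}',
--                     f'Ответ: {quotient}, остаток {remainder}',
--                     'Совет: остаток всегда должен быть меньше делителя']
--         return join_explanation_lines(*rows)
--     # one fused pass: `pending` holds only the VALUE of the previous division step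
--     lines = ['Ищем частное']
--     current = ''
--     pending = None
--     for digit in str(left):
--         current += digit
--         value = int(current)
--         if value < right:
--             continue
--         if pending is None:
--             lines.append(f'Сначала берём первое неполное делимое {value}')
--         else:
--             lines.append(_choice(right, pending) + f', сносим следующую цифру и получаем {value}')
--         current = str(value - value // right * right)
--         pending = value
--     if pending is None:
--         lines.append(f'{left} меньше {right}, значит в частном будет 0')
--         if remainder:
--             lines.append(f'Остаток равен {remainder}')
--         answer = '0' if remainder == 0 else f'0, остаток {remainder}'
--         advice = 'если делимое меньше делителя, частное начинается с нуля'
--     else: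
--         tail = ', деление закончено' if pending - pending // right * right == 0 else ', это и есть остаток'
--         lines.append(_choice(right, pending) + tail)
--         answer = str(quotient) if remainder == 0 else f'{quotient}, остаток {remainder}'
--         advice = 'в делении столбиком повторяй шаги: взял, подобрал, умножил, вычел'
--     return join_explanation_lines(*lines, f'Ответ: {answer}', f'Совет: {advice}')
-- ===== Notes on version B (the rewrite author's own statement) =====
-- stated objective: simpler
-- what changed: B replaces A's two-stage pipeline (a helper building a list of 5-field step dicts with explicit next-digit lookahead, then an indexed render loop peeking at steps[index+1]) by one fused pass over the dividend's digits whose only carried step state is the VALUE of the previous step (quotient digit, product and remainder are recomputed from that value at render time by a shared _choice/_mul_eq formatter), flushing the buffered step when the next step or the end is reached.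
import Mathlib
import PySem

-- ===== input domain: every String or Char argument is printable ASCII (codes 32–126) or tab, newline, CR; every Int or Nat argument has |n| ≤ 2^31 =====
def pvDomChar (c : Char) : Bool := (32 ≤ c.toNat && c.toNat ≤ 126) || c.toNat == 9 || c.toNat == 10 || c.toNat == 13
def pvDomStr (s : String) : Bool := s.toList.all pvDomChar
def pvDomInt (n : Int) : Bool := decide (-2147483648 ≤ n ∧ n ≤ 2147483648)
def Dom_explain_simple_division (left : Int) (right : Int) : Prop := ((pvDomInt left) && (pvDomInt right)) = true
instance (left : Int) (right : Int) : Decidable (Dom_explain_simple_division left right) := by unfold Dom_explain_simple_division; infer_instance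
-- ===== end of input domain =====

-- B fuses A's step-table helper and its indexed lookahead render into one pass whose only
-- carried step state is the previous step's value, recomputing its fields at render time
-- (objective: simpler; return value only).

-- ===== PORT A =====

-- normalize_sentence (helper of both Python modules)
def pvNorm (text : String) : String :=
  let line := PySem.Str.strip text
  if line = "" then ""
  else
    -- line.rstrip() after strip() is the same string; ported literally
    let line := PySem.Str.rstrip line
    match PySem.Str.pyGet? line (-1) with
    | some c => if c = '.' ∨ c = '!' ∨ c = '?' then line else line ++ "."
    | none => line   -- unreachable: line ≠ ""

-- join_explanation_lines (helper of both Python modules)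
def pvJoin (xs : List String) : String :=
  PySem.Str.join "\n" ((xs.filter (fun l => PySem.Str.strip l ≠ "")).map pvNorm)

-- int(s); Python raises ValueError when s is not int-like — that happens only for
-- left < 0 with right ≥ 10 (the '-' sign reaches int('-')), excluded by Pre_ below.
def pvInt (s : String) : Int := (PySem.Int.ofStr? s).getD 0

structure PVStep where
  cur : Int
  qd : Int
  prod : Int
  rem : Int
  nextDigit : Option Int
deriving Repr, DecidableEq

-- _build_long_division_steps_v9: loop over the digits carrying (current, quotient, started);
-- the appended steps are returned as the cons-built first component.
def pvBuild (divisor : Int) : List Char → String → String → Bool → (List PVStep × String × Int)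
  | [], current, quotient, started =>
      ([], (if started then quotient else "0"),
        pvInt (if current = "" then "0" else current))   -- int(current or '0')
  | d :: rest, current, quotient, started =>
      let current := current.push d
      let cn := pvInt current
      if cn < divisor then
        pvBuild divisor rest current (if started then quotient ++ "0" else quotient) started
      else
        let q := PySem.Int.floordiv cn divisor
        let p := q * divisor
        let r := cn - p
        let nd : Option Int := match rest with
          | [] => none
          | d2 :: _ => some (pvInt (String.singleton d2))   -- int(digits[index+1])
        let res := pvBuild divisor rest (PySem.Int.toStr r) (quotient ++ PySem.Int.toStr q) true
        (⟨cn, q, p, r, nd⟩ :: res.1, res.2)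

-- the for-loop over enumerate(steps): next_current is the head of the remaining steps
def pvRender (right : Int) : List PVStep → List String
  | [] => []
  | s :: rest =>
      let nextTry := (s.qd + 1) * right
      let choice :=
        if nextTry > s.cur then
          "Подбираем " ++ PySem.Int.toStr s.qd ++ ", потому что " ++ PySem.Int.toStr s.qd ++
            " × " ++ PySem.Int.toStr right ++ " = " ++ PySem.Int.toStr s.prod ++ ", а " ++
            PySem.Int.toStr (s.qd + 1) ++ " × " ++ PySem.Int.toStr right ++ " = " ++
            PySem.Int.toStr nextTry ++ ", это уже больше"
        else
          "Подбираем " ++ PySem.Int.toStr s.qd ++ ", потому что " ++ PySem.Int.toStr s.qd ++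
            " × " ++ PySem.Int.toStr right ++ " = " ++ PySem.Int.toStr s.prod
      let line :=
        match rest with
        | s2 :: _ =>
            choice ++ ". После вычитания остаётся " ++ PySem.Int.toStr s.rem ++
              ", сносим следующую цифру и получаем " ++ PySem.Int.toStr s2.cur
        | [] =>
            if s.rem = 0 then choice ++ ". После вычитания остаётся 0, деление закончено"
            else choice ++ ". После вычитания остаётся " ++ PySem.Int.toStr s.rem ++
              ", это и есть остаток"
      line :: pvRender right rest

def explain_simple_division (left : Int) (right : Int) : String :=
  if right = 0 then
    pvJoin ["На ноль делить нельзя", "Ответ: деление на ноль невозможно",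
            "Совет: сначала смотри на делитель"]
  else
    let quotient := PySem.Int.floordiv left right
    let remainder := PySem.Int.mod left right
    if left < 100 ∧ right < 10 then
      if remainder = 0 then
        pvJoin ["Ищем, сколько раз делитель помещается в делимом",
                PySem.Int.toStr quotient ++ " × " ++ PySem.Int.toStr right ++ " = " ++
                  PySem.Int.toStr left ++ ", значит " ++ PySem.Int.toStr left ++ " : " ++
                  PySem.Int.toStr right ++ " = " ++ PySem.Int.toStr quotient,
                "Ответ: " ++ PySem.Int.toStr quotient,
                "Совет: в делении ищи число, которое при умножении даёт делимое"]
      else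
        pvJoin ["Ищем, сколько полных раз делитель помещается в делимом",
                PySem.Int.toStr quotient ++ " × " ++ PySem.Int.toStr right ++ " = " ++
                  PySem.Int.toStr (quotient * right),
                "После вычитания остаётся " ++ PySem.Int.toStr (left - quotient * right),
                "Ответ: " ++ PySem.Int.toStr quotient ++ ", остаток " ++ PySem.Int.toStr remainder,
                "Совет: остаток всегда должен быть меньше делителя"]
    else
      let steps := (pvBuild right (PySem.Int.toStr left).toList "" "" false).1
      match steps with
      | [] =>
          let lines := ["Ищем частное",
            PySem.Int.toStr left ++ " меньше " ++ PySem.Int.toStr right ++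
              ", значит в частном будет 0"]
          let lines := if remainder ≠ 0 then
              lines ++ ["Остаток равен " ++ PySem.Int.toStr remainder]
            else lines
          let answer := if remainder = 0 then "0" else "0, остаток " ++ PySem.Int.toStr remainder
          pvJoin (lines ++ ["Ответ: " ++ answer,
            "Совет: если делимое меньше делителя, частное начинается с нуля"])
      | first :: _ =>
          let lines := ["Ищем частное",
            "Сначала берём первое неполное делимое " ++ PySem.Int.toStr first.cur] ++
            pvRender right steps
          let answer := if remainder = 0 then PySem.Int.toStr quotient
            else PySem.Int.toStr quotient ++ ", остаток " ++ PySem.Int.toStr remainder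
          pvJoin (lines ++ ["Ответ: " ++ answer,
            "Совет: в делении столбиком повторяй шаги: взял, подобрал, умножил, вычел"])

-- ===== PORT B =====

-- _mul_eq of Source B: the "a × b = ab" fragment used throughout B
def pvMulEq (a b : Int) : String :=
  PySem.Int.toStr a ++ " × " ++ PySem.Int.toStr b ++ " = " ++ PySem.Int.toStr (a * b)

-- _choice of Source B: the whole step sentence recomputed from the step's value c alone
def pvChoice (right c : Int) : String :=
  let q := PySem.Int.floordiv c right
  let text := "Подбираем " ++ PySem.Int.toStr q ++ ", потому что " ++ pvMulEq q right
  let text := if (q + 1) * right > c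
    then text ++ ", а " ++ pvMulEq (q + 1) right ++ ", это уже больше" else text
  text ++ ". После вычитания остаётся " ++ PySem.Int.toStr (c - q * right)

-- Source B's fused pass: `pending` buffers only the previous step's value
def pvScan (right : Int) : List Char → String → Option Int → List String →
    Option Int × List String
  | [], _current, pending, lines => (pending, lines)
  | d :: rest, current, pending, lines =>
      let current := current.push d
      let value := pvInt current
      if value < right then pvScan right rest current pending lines
      else
        pvScan right rest
          (PySem.Int.toStr (value - PySem.Int.floordiv value right * right)) (some value)
          (lines ++ [match pending with
            | none => "Сначала берём первое неполное делимое " ++ PySem.Int.toStr value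
            | some c0 => pvChoice right c0 ++ ", сносим следующую цифру и получаем " ++
                PySem.Int.toStr value])

def explain_simple_division_alt (left : Int) (right : Int) : String :=
  if right = 0 then
    pvJoin ["На ноль делить нельзя", "Ответ: деление на ноль невозможно",
            "Совет: сначала смотри на делитель"]
  else
    let quotient := PySem.Int.floordiv left right
    let remainder := PySem.Int.mod left right
    if left < 100 ∧ right < 10 then
      pvJoin (if remainder = 0 then
          ["Ищем, сколько раз делитель помещается в делимом",
           pvMulEq quotient right ++ ", значит " ++ PySem.Int.toStr left ++ " : " ++
             PySem.Int.toStr right ++ " = " ++ PySem.Int.toStr quotient,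
           "Ответ: " ++ PySem.Int.toStr quotient,
           "Совет: в делении ищи число, которое при умножении даёт делимое"]
        else
          ["Ищем, сколько полных раз делитель помещается в делимом",
           pvMulEq quotient right,
           "После вычитания остаётся " ++ PySem.Int.toStr (left - quotient * right),
           "Ответ: " ++ PySem.Int.toStr quotient ++ ", остаток " ++ PySem.Int.toStr remainder,
           "Совет: остаток всегда должен быть меньше делителя"])
    else
      let s := pvScan right (PySem.Int.toStr left).toList "" none ["Ищем частное"]
      let lar : List String × String × String :=
        match s.1 with
        | none =>
            (s.2 ++ [PySem.Int.toStr left ++ " меньше " ++ PySem.Int.toStr right ++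
                ", значит в частном будет 0"] ++
              (if remainder ≠ 0 then ["Остаток равен " ++ PySem.Int.toStr remainder] else []),
             (if remainder = 0 then "0" else "0, остаток " ++ PySem.Int.toStr remainder),
             "если делимое меньше делителя, частное начинается с нуля")
        | some c0 =>
            (s.2 ++ [pvChoice right c0 ++
              (if c0 - PySem.Int.floordiv c0 right * right = 0 then ", деление закончено"
               else ", это и есть остаток")],
             (if remainder = 0 then PySem.Int.toStr quotient
              else PySem.Int.toStr quotient ++ ", остаток " ++ PySem.Int.toStr remainder),
             "в делении столбиком повторяй шаги: взял, подобрал, умножил, вычел")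
      pvJoin (lar.1 ++ ["Ответ: " ++ lar.2.1, "Совет: " ++ lar.2.2])

-- ===== PRECONDITION & SPEC =====

-- Pre_ excludes exactly the inputs where the Python A raises: for left < 0 and right ≥ 10 the
-- long-division branch runs int('-') on the sign character of str(left) — a ValueError (B raises there too).
def Pre_explain_simple_division (left : Int) (right : Int) : Prop :=
  ¬ (left < 0 ∧ 10 ≤ right)
instance (left : Int) (right : Int) : Decidable (Pre_explain_simple_division left right) := by
  unfold Pre_explain_simple_division; infer_instance

def pvWitness_explain_simple_division : Int × Int := (938, 4)

def Spec_explain_simple_division (left : Int) (right : Int) (out : String) : Prop := out = explain_simple_division_alt left right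
instance (left : Int) (right : Int) (out : String) : Decidable (Spec_explain_simple_division left right out) := by unfold Spec_explain_simple_division; infer_instance

-- ===== CLAIM (what is proved, stated in full; the proofs are below) =====
def Claim_equal_explain_simple_division : Prop := ∀ (left : Int) (right : Int), Dom_explain_simple_division left right → Pre_explain_simple_division left right → Spec_explain_simple_division left right (explain_simple_division left right)

-- ===== LEMMAS AND PROOFS =====

-- The last line B flushes after the loop, for a buffered step value c0
def pvLast (right c0 : Int) : String :=
  pvChoice right c0 ++
    (if c0 - PySem.Int.floordiv c0 right * right = 0 then ", деление закончено"
     else ", это и есть остаток")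

-- Once the buffer holds a step value, the fused pass produces exactly the render of the
-- corresponding full step (its fields recomputed from the value) consed onto the steps A's
-- builder would still produce from the same (current, digits) state.
theorem pvScan_some (right : Int) (rest : List Char) :
    ∀ (current quotient : String) (c0 : Int) (nd : Option Int) (lines : List String),
    (pvScan right rest current (some c0) lines).1.isSome = true ∧
    (pvScan right rest current (some c0) lines).2 ++
        [(pvScan right rest current (some c0) lines).1.elim "" (pvLast right)] =
      lines ++ pvRender right
        (⟨c0, PySem.Int.floordiv c0 right, PySem.Int.floordiv c0 right * right,
            c0 - PySem.Int.floordiv c0 right * right, nd⟩ ::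
          (pvBuild right rest current quotient true).1) := by
  intro current quotient c0 nd lines
  induction rest generalizing current quotient c0 nd lines with
  | nil =>
    refine ⟨rfl, ?_⟩
    have h00 : PySem.Int.toStr (0:Int) = "0" := rfl
    by_cases hr : c0 - PySem.Int.floordiv c0 right * right = 0 <;>
      simp [pvScan, pvBuild, pvRender, pvLast, pvChoice, pvMulEq, hr, h00, String.append_assoc]
  | cons d rest ih =>
    by_cases h : pvInt (current.push d) < right
    · simpa [pvScan, pvBuild, h] using
        ih (current.push d) (if true = true then quotient ++ "0" else quotient) c0 nd lines
    · have := ih (PySem.Int.toStr (pvInt (current.push d) -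
          PySem.Int.floordiv (pvInt (current.push d)) right * right))
        (quotient ++ PySem.Int.toStr (PySem.Int.floordiv (pvInt (current.push d)) right))
        (pvInt (current.push d))
        (match rest with
          | [] => none
          | d2 :: _ => some (pvInt (String.singleton d2)))
        (lines ++ [pvChoice right c0 ++ ", сносим следующую цифру и получаем " ++
          PySem.Int.toStr (pvInt (current.push d))])
      refine ⟨?_, ?_⟩
      · simpa [pvScan, h] using this.1
      · have h2 := this.2
        simp only [pvScan, pvBuild, pvRender, pvChoice, pvMulEq, h, if_false, gt_iff_lt,
          List.append_assoc, List.cons_append, List.nil_append,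
          String.append_assoc] at h2 ⊢
        exact h2

-- Starting with an empty buffer: either no step ever happens (A's builder returns no steps and
-- the fused pass leaves the lines untouched), or the first step's headline plus the render appear.
theorem pvScan_none (right : Int) (rest : List Char) :
    ∀ (current quotient : String) (lines : List String),
    (((pvScan right rest current none lines).1 = none →
        (pvScan right rest current none lines).2 = lines ∧
        (pvBuild right rest current quotient false).1 = []) ∧
     (∀ c0, (pvScan right rest current none lines).1 = some c0 →
        ∃ S0 restS, (pvBuild right rest current quotient false).1 = S0 :: restS ∧
          (pvScan right rest current none lines).2 ++ [pvLast right c0] =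
            lines ++ ("Сначала берём первое неполное делимое " ++ PySem.Int.toStr S0.cur) ::
              pvRender right (S0 :: restS))) := by
  intro current quotient lines
  induction rest generalizing current quotient lines with
  | nil =>
    refine ⟨fun _ => ⟨rfl, rfl⟩, fun c0 hc => ?_⟩
    simp [pvScan] at hc
  | cons d rest ih =>
    by_cases h : pvInt (current.push d) < right
    · simpa [pvScan, pvBuild, h] using ih (current.push d) quotient lines
    · have hs := pvScan_some right rest
        (PySem.Int.toStr (pvInt (current.push d) -
          PySem.Int.floordiv (pvInt (current.push d)) right * right))
        (quotient ++ PySem.Int.toStr (PySem.Int.floordiv (pvInt (current.push d)) right))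
        (pvInt (current.push d))
        (match rest with
          | [] => none
          | d2 :: _ => some (pvInt (String.singleton d2)))
        (lines ++ ["Сначала берём первое неполное делимое " ++
          PySem.Int.toStr (pvInt (current.push d))])
      refine ⟨fun h0 => ?_, fun c0 hc => ?_⟩
      · exfalso
        simp only [pvScan, h, if_false] at h0
        rw [h0] at hs
        simp at hs
      · refine ⟨⟨pvInt (current.push d), PySem.Int.floordiv (pvInt (current.push d)) right,
          PySem.Int.floordiv (pvInt (current.push d)) right * right,
          pvInt (current.push d) - PySem.Int.floordiv (pvInt (current.push d)) right * right,
          (match rest with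
            | [] => none
            | d2 :: _ => some (pvInt (String.singleton d2)))⟩,
          (pvBuild right rest
            (PySem.Int.toStr (pvInt (current.push d) -
              PySem.Int.floordiv (pvInt (current.push d)) right * right))
            (quotient ++ PySem.Int.toStr (PySem.Int.floordiv (pvInt (current.push d)) right))
            true).1, ?_, ?_⟩
        · simp only [pvBuild, h, if_false]
          cases rest <;> rfl
        · have h2 := hs.2
          simp only [pvScan, h, if_false] at hc ⊢
          rw [hc] at h2
          simp only [Option.elim] at h2
          simpa [List.append_assoc] using h2

-- ===== VERDICT (by name: the statement is the Claim_ definition above) =====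
theorem explain_simple_division_spec : Claim_equal_explain_simple_division := by
  intro left right _hdom _hpre
  unfold Spec_explain_simple_division
  by_cases h0 : right = 0
  · simp [explain_simple_division, explain_simple_division_alt, h0]
  · by_cases hsmall : left < 100 ∧ right < 10
    · by_cases hr : PySem.Int.mod left right = 0
      · have hq : PySem.Int.floordiv left right * right = left := by
          have := PySem.Int.floordiv_mul_add_mod left right
          omega
        simp [explain_simple_division, explain_simple_division_alt, pvMulEq, h0, hsmall, hr, hq]
      · simp [explain_simple_division, explain_simple_division_alt, pvMulEq, h0, hsmall, hr,
          String.append_assoc]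
    · have H := pvScan_none right (PySem.Int.toStr left).toList "" "" ["Ищем частное"]
      rcases hf : (pvScan right (PySem.Int.toStr left).toList "" none ["Ищем частное"]).1
        with _ | c0
      · obtain ⟨hl, hb⟩ := H.1 hf
        simp only [PySem.Int.toList_toStr] at hb hf hl
        by_cases hr : PySem.Int.mod left right = 0 <;>
          simp [explain_simple_division, explain_simple_division_alt, h0, hsmall, hr,
            hb, hf, hl]
      · obtain ⟨S0, restS, hb, heq⟩ := H.2 c0 hf
        have heq' : ∀ tail : List String,
            (pvScan right (PySem.Int.toStr left).toList "" none ["Ищем частное"]).2 ++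
              (pvLast right c0 :: tail) =
            "Ищем частное" :: ("Сначала берём первое неполное делимое " ++
              PySem.Int.toStr S0.cur) :: (pvRender right (S0 :: restS) ++ tail) := by
          intro tail
          have := congrArg (· ++ tail) heq
          simpa [List.append_assoc] using this
        simp only [PySem.Int.toList_toStr, pvLast] at hb hf heq'
        by_cases hr : PySem.Int.mod left right = 0 <;>
          simp [explain_simple_division, explain_simple_division_alt, h0, hsmall, hr,
            hb, hf, heq']
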